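-- pv_equiv track=rewrite | github.com/Security-Phoenix-demo/Utils | .github/scripts/scan_sensitive_data.py | format_findings_summary
-- ===== SOURCE A (Python) =====
-- def format_findings_summary(findings):
--     summary = {}
--     for path, _, name, _ in findings:
--         key = str(path)
--         entry = summary.setdefault(key, {"count": 0, "rules": set()})
--         entry["count"] += 1
--         entry["rules"].add(name)
--     lines = ["Findings by file:"]
--     for path in sorted(summary):
--         entry = summary[path]
--         rules = ", ".join(sorted(entry["rules"]))
--         lines.append(f"- {path} ({entry['count']} finding(s), rules: {rules})")
--     return "\n".join(lines)
-- ===== SOURCE B (Python) =====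
-- def format_findings_summary(findings):
--     paths = sorted({p for p, _, _, _ in findings})
--     lines = ["Findings by file:"]
--     for p in paths:
--         names = [n for q, _, n, _ in findings if q == p]
--         rules = ", ".join(sorted(set(names)))
--         lines.append(f"- {p} ({len(names)} finding(s), rules: {rules})")
--     return "\n".join(lines)
-- ===== Notes on version B (the rewrite author's own statement) =====
-- stated objective: simpler
-- what changed: Replaced the dict-of-counters-and-sets accumulation pass (setdefault + in-place mutation, then sort of the keys) by a direct comprehension: sort the distinct paths once, then for each path filter the findings to get its count and its sorted rule set.
import Mathlib
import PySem

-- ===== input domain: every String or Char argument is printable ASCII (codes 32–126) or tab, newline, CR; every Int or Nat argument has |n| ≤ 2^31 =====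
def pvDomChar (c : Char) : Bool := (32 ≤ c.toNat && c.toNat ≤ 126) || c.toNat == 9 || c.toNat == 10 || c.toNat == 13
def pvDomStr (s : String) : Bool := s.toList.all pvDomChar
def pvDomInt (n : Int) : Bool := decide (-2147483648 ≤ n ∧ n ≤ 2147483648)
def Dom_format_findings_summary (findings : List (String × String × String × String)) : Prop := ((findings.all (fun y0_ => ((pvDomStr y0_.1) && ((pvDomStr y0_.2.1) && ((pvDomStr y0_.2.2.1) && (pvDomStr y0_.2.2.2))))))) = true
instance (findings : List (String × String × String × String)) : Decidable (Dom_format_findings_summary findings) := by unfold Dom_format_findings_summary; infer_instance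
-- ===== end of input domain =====

-- B replaces A's dict-accumulation pass by filtering the findings per sorted distinct path (simpler, not faster).

-- ===== PORT A =====
-- one loop iteration: entry = summary.setdefault(key, {"count": 0, "rules": set()}); entry["count"] += 1; entry["rules"].add(name)
-- (the fixed-shape inner dict {"count": int, "rules": set} is modelled as the pair Int × PySem.Set String;
--  key = str(path): str() of a str is the string itself)
def pvStepA (d : PySem.Dict String (Int × PySem.Set String)) (f : String × String × String × String) :
    PySem.Dict String (Int × PySem.Set String) :=
  (d.setdefault f.1 ((0 : Int), PySem.Set.empty)).modify f.1 ((0 : Int), PySem.Set.empty)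
    (fun e => (e.1 + 1, PySem.Set.add e.2 f.2.2.1))

def format_findings_summary (findings : List (String × String × String × String)) : String :=
  let summary := findings.foldl pvStepA PySem.Dict.empty
  let lines := ["Findings by file:"] ++
    (PySem.List.sorted summary.keys (fun x => x) false).map (fun path =>
      -- summary[path]: the key is always present when this line runs, so the default is never used
      let entry := summary.getD path ((0 : Int), PySem.Set.empty)
      let rules := PySem.Str.join ", " (PySem.List.sorted entry.2 (fun x => x) false)
      "- " ++ path ++ " (" ++ PySem.Int.toStr entry.1 ++ " finding(s), rules: " ++ rules ++ ")")
  PySem.Str.join "\n" lines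

-- ===== PORT B =====
def format_findings_summary_alt (findings : List (String × String × String × String)) : String :=
  let paths := PySem.List.sorted (PySem.Set.ofList (findings.map (fun f => f.1))) (fun x => x) false
  let lines := ["Findings by file:"] ++
    paths.map (fun p =>
      let names := (findings.filter (fun f => f.1 == p)).map (fun f => f.2.2.1)
      let rules := PySem.Str.join ", " (PySem.List.sorted (PySem.Set.ofList names) (fun x => x) false)
      "- " ++ p ++ " (" ++ PySem.Int.toStr (names.length : Int) ++ " finding(s), rules: " ++ rules ++ ")")
  PySem.Str.join "\n" lines

-- ===== PRECONDITION & SPEC =====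
def Spec_format_findings_summary (findings : List (String × String × String × String)) (out : String) : Prop := out = format_findings_summary_alt findings
instance (findings : List (String × String × String × String)) (out : String) : Decidable (Spec_format_findings_summary findings out) := by unfold Spec_format_findings_summary; infer_instance

-- ===== CLAIM (what is proved, stated in full; the proofs are below) =====
def Claim_equal_format_findings_summary : Prop := ∀ (findings : List (String × String × String × String)), Dom_format_findings_summary findings → Spec_format_findings_summary findings (format_findings_summary findings)

-- ===== LEMMAS AND PROOFS =====

theorem pvStepA_keys (d : PySem.Dict String (Int × PySem.Set String))
    (f : String × String × String × String) :
    (pvStepA d f).keys = PySem.Set.add d.keys f.1 := by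
  unfold pvStepA
  rw [PySem.Dict.keys_modify,
      PySem.Dict.keys_insert_of_contains _ _ (by simp [PySem.Dict.contains_setdefault]),
      PySem.Dict.keys_setdefault]
  by_cases hm : f.1 ∈ d.keys
  · simp [PySem.Set.add, PySem.Set.contains, PySem.Dict.contains_eq_decide_mem_keys, hm]
  · simp [PySem.Set.add, PySem.Set.contains, PySem.Dict.contains_eq_decide_mem_keys, hm]

theorem pvFoldA_keys (l : List (String × String × String × String))
    (d : PySem.Dict String (Int × PySem.Set String)) :
    (l.foldl pvStepA d).keys = (l.map (fun f => f.1)).foldl PySem.Set.add d.keys := by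
  induction l generalizing d with
  | nil => rfl
  | cons f l ih => simp only [List.foldl_cons, List.map_cons, ih, pvStepA_keys]

theorem pvStepA_getD (d : PySem.Dict String (Int × PySem.Set String))
    (f : String × String × String × String) (p : String) :
    (pvStepA d f).getD p ((0 : Int), PySem.Set.empty) =
      if p = f.1 then
        ((d.getD f.1 ((0 : Int), PySem.Set.empty)).1 + 1,
          PySem.Set.add (d.getD f.1 ((0 : Int), PySem.Set.empty)).2 f.2.2.1)
      else d.getD p ((0 : Int), PySem.Set.empty) := by
  unfold pvStepA
  rw [PySem.Dict.getD_modify]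
  by_cases h : p = f.1
  · simp [h, PySem.Dict.getD_setdefault_self]
  · simp only [if_neg h]
    rw [PySem.Dict.getD_eq_get?_getD, PySem.Dict.get?_setdefault_of_ne _ _ h,
        ← PySem.Dict.getD_eq_get?_getD]

theorem pvFoldA_getD (l : List (String × String × String × String))
    (d : PySem.Dict String (Int × PySem.Set String)) (p : String) :
    (l.foldl pvStepA d).getD p ((0 : Int), PySem.Set.empty) =
      ((d.getD p ((0 : Int), PySem.Set.empty)).1
          + (((l.filter (fun f => f.1 == p)).map (fun f => f.2.2.1)).length : Int),
        ((l.filter (fun f => f.1 == p)).map (fun f => f.2.2.1)).foldl PySem.Set.add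
          (d.getD p ((0 : Int), PySem.Set.empty)).2) := by
  induction l generalizing d with
  | nil => simp
  | cons f l ih =>
    simp only [List.foldl_cons, ih, pvStepA_getD]
    by_cases h : p = f.1
    · subst h
      simp only [List.filter_cons, beq_self_eq_true, if_true, List.map_cons,
        List.length_cons, List.foldl_cons, Prod.ext_iff]
      refine ⟨by push_cast; ring, trivial⟩
    · have hb : (f.1 == p) = false := by simp [Ne.symm h]
      simp [if_neg h, hb]

-- ===== VERDICT (by name: the statement is the Claim_ definition above) =====
theorem format_findings_summary_spec : Claim_equal_format_findings_summary := by
  intro findings _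
  unfold Spec_format_findings_summary format_findings_summary format_findings_summary_alt
  simp only [pvFoldA_keys, PySem.Dict.keys_empty, ← PySem.Set.ofList_eq_foldl]
  congr 2
  apply List.map_congr_left
  intro p _
  simp only [pvFoldA_getD, PySem.Dict.getD_empty]
  simp only [PySem.Set.empty, ← PySem.Set.ofList_eq_foldl]
  simp
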